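-- pv_equiv track=rewrite | github.com/kedz/discourse | src/egrid.py | generate_transitions
-- ===== SOURCE A (Python) =====
-- def generate_transitions(role_set, path_size):
--     """Create an ordered list of transitions, from a set role labels. The number of roles is exponential in the path size."""
--
--     # Each loop iteration i adds all transitions of size (i+1) to the list trans.
--     trans = ['']
--
--     for p in range(path_size):
--         new_trans = []
--         for r in role_set:
--             for t in trans:
--                 new_trans.append(t+r)
--         trans = new_trans
--
--     # trans is now a sorted list of all possible role transitions.
--     return sorted(trans)
-- ===== SOURCE B (Python) =====
-- def generate_transitions(role_set, path_size):
--     """Create an ordered list of transitions, from a set role labels. The number of roles is exponential in the path size."""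
--     def gen(n):
--         if n <= 0:
--             return ['']
--         return [t + r for t in gen(n - 1) for r in role_set]
--     return sorted(gen(path_size))
-- ===== Notes on version B (the rewrite author's own statement) =====
-- stated objective: alternative
-- what changed: Replaces the iterative length-by-length loop with a self-recursion on path_size that extends each shorter string by every role (inner/outer loop roles transposed), with one final sort.
import Mathlib
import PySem

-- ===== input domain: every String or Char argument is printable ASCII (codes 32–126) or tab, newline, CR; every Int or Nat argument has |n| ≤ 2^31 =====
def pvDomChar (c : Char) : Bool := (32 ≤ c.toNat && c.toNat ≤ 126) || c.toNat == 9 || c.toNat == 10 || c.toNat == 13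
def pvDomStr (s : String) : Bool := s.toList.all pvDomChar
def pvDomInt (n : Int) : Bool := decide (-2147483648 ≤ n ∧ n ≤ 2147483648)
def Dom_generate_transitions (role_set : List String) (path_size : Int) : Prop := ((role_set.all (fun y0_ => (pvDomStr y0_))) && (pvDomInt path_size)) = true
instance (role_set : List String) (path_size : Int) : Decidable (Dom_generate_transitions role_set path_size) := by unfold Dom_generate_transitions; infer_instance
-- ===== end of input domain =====

-- B changes the decomposition (recursion on path_size, loops transposed); same cost, equal output via one final sort.

-- ===== PORT A =====
def generate_transitions (role_set : List String) (path_size : Int) : List String :=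
  let trans :=
    (PySem.List.pyRange 0 path_size 1).foldl
      (fun trans _p =>
        role_set.foldl
          (fun new_trans r => trans.foldl (fun nt t => nt ++ [t ++ r]) new_trans)
          [])
      [""]
  PySem.List.sorted trans (fun x => x) false

-- ===== PORT B =====
def genAltRec (role_set : List String) : Nat → List String
  | 0 => [""]
  | n + 1 => (genAltRec role_set n).flatMap (fun t => role_set.map (fun r => t ++ r))

def generate_transitions_alt (role_set : List String) (path_size : Int) : List String :=
  PySem.List.sorted (genAltRec role_set path_size.toNat) (fun x => x) false

-- ===== PRECONDITION & SPEC =====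
def Spec_generate_transitions (role_set : List String) (path_size : Int) (out : List String) : Prop := out = generate_transitions_alt role_set path_size
instance (role_set : List String) (path_size : Int) (out : List String) : Decidable (Spec_generate_transitions role_set path_size out) := by unfold Spec_generate_transitions; infer_instance

-- ===== CLAIM (what is proved, stated in full; the proofs are below) =====
def Claim_equal_generate_transitions : Prop := ∀ (role_set : List String) (path_size : Int), Dom_generate_transitions role_set path_size → Spec_generate_transitions role_set path_size (generate_transitions role_set path_size)

-- ===== LEMMAS AND PROOFS =====

-- A's one loop iteration, after unfolding the append-folds.
lemma stepA_eq (role_set trans : List String) :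
    role_set.foldl (fun new_trans r => trans.foldl (fun nt t => nt ++ [t ++ r]) new_trans) [] =
      role_set.flatMap (fun r => trans.map (fun t => t ++ r)) := by
  have h : (fun (new_trans : List String) (r : String) =>
        trans.foldl (fun nt t => nt ++ [t ++ r]) new_trans) =
      fun new_trans r => new_trans ++ trans.map (fun t => t ++ r) := by
    funext acc r
    exact PySem.List.foldl_append_singleton_eq_map (fun t => t ++ r) trans acc
  rw [h, PySem.List.foldl_append_eq_flatMap, List.nil_append]

-- the two nested enumerations are transposes of each other
lemma flatMap_swap_perm {α β γ : Type} (l1 : List α) (l2 : List β) (f : α → β → γ) :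
    (l1.flatMap (fun a => l2.map (fun b => f a b))).Perm
      (l2.flatMap (fun b => l1.map (fun a => f a b))) := by
  induction l1 with
  | nil => simp
  | cons a l1 ih =>
    have h2 : ∀ (l2 : List β),
        (l2.flatMap (fun b => f a b :: l1.map (fun a' => f a' b))).Perm
          (l2.map (fun b => f a b) ++ l2.flatMap (fun b => l1.map (fun a' => f a' b))) := by
      intro l2
      induction l2 with
      | nil => simp
      | cons b l2 ih2 =>
        simp only [List.flatMap_cons, List.map_cons, List.cons_append]
        refine List.Perm.cons _ ?_
        calc (l1.map (fun a' => f a' b) ++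
                l2.flatMap (fun b' => f a b' :: l1.map (fun a' => f a' b')))
            |>.Perm (l1.map (fun a' => f a' b) ++
                (l2.map (fun b' => f a b') ++ l2.flatMap (fun b' => l1.map (fun a' => f a' b')))) :=
              List.Perm.append_left _ ih2
          _ = (l1.map (fun a' => f a' b) ++ l2.map (fun b' => f a b')) ++
                l2.flatMap (fun b' => l1.map (fun a' => f a' b')) := by
              simp [List.append_assoc]
          _ |>.Perm ((l2.map (fun b' => f a b') ++ l1.map (fun a' => f a' b)) ++
                l2.flatMap (fun b' => l1.map (fun a' => f a' b'))) :=
              List.Perm.append_right _ List.perm_append_comm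
          _ = l2.map (fun b' => f a b') ++
                (l1.map (fun a' => f a' b) ++ l2.flatMap (fun b' => l1.map (fun a' => f a' b'))) := by
              simp [List.append_assoc]
    simp only [List.flatMap_cons]
    exact (List.Perm.append_left _ ih).trans (h2 l2).symm

-- A's loop state after n iterations is a permutation of B's recursion at depth n
lemma loopA_perm (role_set : List String) : ∀ (n : Nat),
    ((PySem.List.pyRange 0 (n : Int) 1).foldl
      (fun trans _p =>
        role_set.foldl
          (fun new_trans r => trans.foldl (fun nt t => nt ++ [t ++ r]) new_trans)
          [])
      [""]).Perm (genAltRec role_set n) := by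
  intro n
  induction n with
  | zero => simp [genAltRec, PySem.List.pyRange_one_eq_nil (by omega : (0:Int) ≤ 0)]
  | succ n ih =>
    rw [show ((n + 1 : Nat) : Int) = (n : Int) + 1 by push_cast; ring,
        PySem.List.pyRange_one_succ_right (by exact_mod_cast Nat.zero_le n)]
    rw [List.foldl_append, List.foldl_cons, List.foldl_nil]
    have key : ∀ (trans trans' : List String), trans.Perm trans' →
        (role_set.foldl (fun new_trans r => trans.foldl (fun nt t => nt ++ [t ++ r]) new_trans) []).Perm
          (trans'.flatMap (fun t => role_set.map (fun r => t ++ r))) := by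
      intro trans trans' hp
      rw [stepA_eq]
      exact (flatMap_swap_perm role_set trans (fun r t => t ++ r)).trans
        (hp.flatMap (fun _ _ => List.Perm.refl _))
    exact key _ _ ih

lemma trans_perm (role_set : List String) (path_size : Int) :
    ((PySem.List.pyRange 0 path_size 1).foldl
      (fun trans _p =>
        role_set.foldl
          (fun new_trans r => trans.foldl (fun nt t => nt ++ [t ++ r]) new_trans)
          [])
      [""]).Perm (genAltRec role_set path_size.toNat) := by
  rcases Int.lt_or_le path_size 0 with h | h
  · rw [PySem.List.pyRange_one_eq_nil (by omega), Int.toNat_of_nonpos (by omega)]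
    simp [genAltRec]
  · have := loopA_perm role_set path_size.toNat
    rwa [Int.toNat_of_nonneg h] at this

-- ===== VERDICT (by name: the statement is the Claim_ definition above) =====
theorem generate_transitions_spec : Claim_equal_generate_transitions := by
  intro role_set path_size _
  unfold Spec_generate_transitions generate_transitions generate_transitions_alt
  exact PySem.List.sorted_eq_sorted_of_perm _ _ _ (fun a b h => h) (trans_perm role_set path_size)
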